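-- pv_equiv track=rewrite | github.com/jaygupta-2k/letter-sort-cli | game/game_logic.py | check_solvability
-- ===== SOURCE A (Python) =====
-- def check_solvability(stack_list, max_stack_size):
--     """
--     Checks if the current game state is solvable by identifying valid moves.
--
--     Args:
--         stack_list (list of lists): The current state of the stacks.
--         max_stack_size (int): The maximum allowed stack size.
--
--     Returns:
--         tuple: (source_index, destination_index) for a valid move, or None if no move exists.
--     """
--     for source_index, source_stack in enumerate(stack_list):
--         if not source_stack:
--             continue  # Skip empty stacks
--
--         for destination_index, destination_stack in enumerate(stack_list):
--             if source_index == destination_index: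
--                 continue  # Skip the same stack
--
--             if (not destination_stack or source_stack[-1] == destination_stack[-1]) and len(destination_stack) < max_stack_size:
--                 return source_index, destination_index
--
--     return None  # No valid moves
-- ===== SOURCE B (Python) =====
-- def check_solvability(stack_list, max_stack_size):
--     # Index the board once: the first empty stack, and per top value the
--     # (increasing) list of non-full stacks carrying that top; then one pass
--     # over sources picking the smallest valid destination directly.
--     empties = []
--     by_top = {}
--     for j, s in enumerate(stack_list):
--         if not s:
--             empties.append(j)
--         elif len(s) < max_stack_size:
--             by_top.setdefault(s[-1], []).append(j)
--     first_empty = empties[0] if empties and max_stack_size > 0 else None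
--
--     for i, s in enumerate(stack_list):
--         if not s:
--             continue
--         lst = by_top.get(s[-1], [])
--         if not lst:
--             t = None
--         elif lst[0] != i:
--             t = lst[0]
--         elif len(lst) > 1:
--             t = lst[1]
--         else:
--             t = None
--         if first_empty is not None and t is not None:
--             return i, min(first_empty, t)
--         if first_empty is not None:
--             return i, first_empty
--         if t is not None:
--             return i, t
--     return None
-- ===== Notes on version B (the rewrite author's own statement) =====
-- stated objective: alternative
-- what changed: Replaces A's nested source-by-destination scan with one indexing pass (first empty stack, plus non-full stack indices grouped by top value in a dict) followed by a single pass over sources that picks the smallest valid destination directly.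
import Mathlib
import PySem

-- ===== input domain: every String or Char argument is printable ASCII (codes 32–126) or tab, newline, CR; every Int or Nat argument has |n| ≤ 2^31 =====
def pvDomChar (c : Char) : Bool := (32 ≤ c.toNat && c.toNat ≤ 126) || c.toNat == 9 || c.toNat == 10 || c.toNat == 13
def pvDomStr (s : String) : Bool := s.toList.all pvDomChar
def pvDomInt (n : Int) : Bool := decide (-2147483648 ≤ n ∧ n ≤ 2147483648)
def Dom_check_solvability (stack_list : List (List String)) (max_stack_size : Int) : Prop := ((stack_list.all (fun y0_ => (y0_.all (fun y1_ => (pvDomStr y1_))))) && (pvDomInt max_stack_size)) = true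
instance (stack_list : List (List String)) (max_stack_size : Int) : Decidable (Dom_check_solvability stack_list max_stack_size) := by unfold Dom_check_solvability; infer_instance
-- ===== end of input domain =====

-- B replaces A's nested source×destination scan by a single indexing pass
-- (first empty stack, non-full stacks grouped by top value) plus one pass over
-- sources picking the smallest valid destination directly; objective: alternative.

-- ===== PORT A =====
-- inner loop: first valid destination index for source `src` at index `i`
def csInnerA (src : List String) (i : Int) (mx : Int) : List (Int × List String) → Option Int
  | [] => none
  | (j, dst) :: rest =>
    if i = j then csInnerA src i mx rest
    else if (dst = [] ∨ PySem.List.pyGet? src (-1) = PySem.List.pyGet? dst (-1)) ∧ (dst.length : Int) < mx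
    then some j
    else csInnerA src i mx rest

-- outer loop over enumerated sources
def csOuterA (stack_list : List (List String)) (mx : Int) : List (Int × List String) → Option (List Int)
  | [] => none
  | (i, src) :: rest =>
    if src = [] then csOuterA stack_list mx rest
    else match csInnerA src i mx (PySem.List.enumerate stack_list 0) with
      | some j => some [i, j]
      | none => csOuterA stack_list mx rest

def check_solvability (stack_list : List (List String)) (max_stack_size : Int) : Option (List Int) :=
  csOuterA stack_list max_stack_size (PySem.List.enumerate stack_list 0)

-- ===== PORT B =====
-- pass 1: collect empty-stack indices and, per top value, the indices of
-- non-full stacks with that top (dict built with setdefault/append)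
def csIndexB (mx : Int) : List (Int × List String) → List Int × PySem.Dict String (List Int) → List Int × PySem.Dict String (List Int)
  | [], st => st
  | (j, s) :: rest, (emp, d) =>
    if s = [] then csIndexB mx rest (emp ++ [j], d)
    else if (s.length : Int) < mx then
      match PySem.List.pyGet? s (-1) with
      | some key => csIndexB mx rest (emp, d.insert key (d.getD key [] ++ [j]))
      | none => csIndexB mx rest (emp, d)  -- unreachable: s ≠ []
    else csIndexB mx rest (emp, d)

-- the t-selection: lst[0] if it isn't i, else lst[1] if present
def csSelB (i : Int) : List Int → Option Int
  | [] => none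
  | j :: rest => if j ≠ i then some j else rest.head?

-- pass 2 over sources
def csPass2B (d : PySem.Dict String (List Int)) (firstEmpty : Option Int) : List (Int × List String) → Option (List Int)
  | [] => none
  | (i, s) :: rest =>
    if s = [] then csPass2B d firstEmpty rest
    else
      let lst : List Int := match PySem.List.pyGet? s (-1) with
        | some key => d.getD key []
        | none => []
      match firstEmpty, csSelB i lst with
      | some e, some t => some [i, min e t]
      | some e, none => some [i, e]
      | none, some t => some [i, t]
      | none, none => csPass2B d firstEmpty rest

def check_solvability_alt (stack_list : List (List String)) (max_stack_size : Int) : Option (List Int) :=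
  let st := csIndexB max_stack_size (PySem.List.enumerate stack_list 0) ([], PySem.Dict.empty)
  let firstEmpty : Option Int := if st.1 ≠ [] ∧ 0 < max_stack_size then st.1.head? else none
  csPass2B st.2 firstEmpty (PySem.List.enumerate stack_list 0)

-- ===== PRECONDITION & SPEC =====
def Spec_check_solvability (stack_list : List (List String)) (max_stack_size : Int) (out : Option (List Int)) : Prop := out = check_solvability_alt stack_list max_stack_size
instance (stack_list : List (List String)) (max_stack_size : Int) (out : Option (List Int)) : Decidable (Spec_check_solvability stack_list max_stack_size out) := by unfold Spec_check_solvability; infer_instance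

-- ===== CLAIM (what is proved, stated in full; the proofs are below) =====
def Claim_equal_check_solvability : Prop := ∀ (stack_list : List (List String)) (max_stack_size : Int), Dom_check_solvability stack_list max_stack_size → Spec_check_solvability stack_list max_stack_size (check_solvability stack_list max_stack_size)

-- ===== LEMMAS AND PROOFS =====

-- combine the two candidate destinations as B's three-way if does
def cmb : Option Int → Option Int → Option Int
  | some e, some t => some (min e t)
  | some e, none => some e
  | none, some t => some t
  | none, none => none

-- indices of the empty stacks
def eIdx (ps : List (Int × List String)) : List Int :=
  (ps.filter (fun p => decide (p.2 = []))).map (·.1)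

-- indices of the non-full stacks with top v
def tIdx (v : String) (mx : Int) (ps : List (Int × List String)) : List Int :=
  (ps.filter (fun p => decide (p.2 ≠ [] ∧ p.2.getLast? = some v ∧ (p.2.length : Int) < mx))).map (·.1)

lemma csIndexB_spec (mx : Int) : ∀ (ps : List (Int × List String)) (emp : List Int) (d : PySem.Dict String (List Int)),
    (csIndexB mx ps (emp, d)).1 = emp ++ eIdx ps ∧
    ∀ v, ((csIndexB mx ps (emp, d)).2).getD v [] = d.getD v [] ++ tIdx v mx ps := by
  intro ps
  induction ps with
  | nil => intro emp d; simp [csIndexB, eIdx, tIdx]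
  | cons p rest ih =>
    obtain ⟨j, s⟩ := p
    intro emp d
    by_cases hs : s = []
    · subst hs
      simp only [csIndexB, if_true]
      obtain ⟨h1, h2⟩ := ih (emp ++ [j]) d
      refine ⟨by rw [h1]; simp [eIdx], fun v => by rw [h2 v]; simp [tIdx]⟩
    · by_cases hlen : (s.length : Int) < mx
      · obtain ⟨k, hk⟩ : ∃ k, s.getLast? = some k := by
          cases hgl : s.getLast? with
          | none => exact absurd (List.getLast?_eq_none_iff.mp hgl) hs
          | some k => exact ⟨k, rfl⟩
        have hpg : PySem.List.pyGet? s (-1) = some k := by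
          rw [PySem.List.pyGet?_neg_one, hk]
        simp only [csIndexB, if_neg hs, if_pos hlen, hpg]
        obtain ⟨h1, h2⟩ := ih emp (d.insert k (d.getD k [] ++ [j]))
        refine ⟨by rw [h1]; simp [eIdx, hs], fun v => ?_⟩
        rw [h2 v, PySem.Dict.getD_insert]
        by_cases hv : v = k
        · subst hv; simp [tIdx, hs, hk, hlen]
        · have : s.getLast? ≠ some v := by rw [hk]; simpa using Ne.symm hv
          simp [tIdx, hs, hlen, hv, this]
      · simp only [csIndexB, if_neg hs, if_neg hlen]
        obtain ⟨h1, h2⟩ := ih emp d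
        exact ⟨by rw [h1]; simp [eIdx, hs], fun v => by rw [h2 v]; simp [tIdx, hlen]⟩

lemma csSelB_mem {i : Int} {L : List Int} {t : Int} (h : csSelB i L = some t) : t ∈ L := by
  cases L with
  | nil => simp [csSelB] at h
  | cons j rest =>
    simp only [csSelB] at h
    split at h
    · simp at h; simp [h]
    · cases rest with
      | nil => simp at h
      | cons b bs => simp at h; simp [h]

lemma csSelB_all_ne {i : Int} {L : List Int} (h : ∀ x ∈ L, x ≠ i) : csSelB i L = L.head? := by
  cases L with
  | nil => rfl
  | cons j rest => simp [csSelB, h j (by simp)]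

lemma inner_eq (src : List String) (i mx : Int) (v : String) (hv : src.getLast? = some v) :
    ∀ ps : List (Int × List String), ps.Pairwise (fun a b => a.1 < b.1) →
      (∀ p ∈ ps, p.1 = i → p.2 ≠ ([] : List String)) →
      csInnerA src i mx ps = cmb (if 0 < mx then (eIdx ps).head? else none) (csSelB i (tIdx v mx ps)) := by
  have hsrc : PySem.List.pyGet? src (-1) = some v := by rw [PySem.List.pyGet?_neg_one, hv]
  intro ps
  induction ps with
  | nil => intro _ _; simp [csInnerA, eIdx, tIdx, csSelB, cmb]
  | cons p rest ih =>
    obtain ⟨j, s⟩ := p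
    intro hpw hi
    have hgt : ∀ q ∈ rest, j < q.1 := (List.pairwise_cons.mp hpw).1
    have hpw' := (List.pairwise_cons.mp hpw).2
    have hi' : ∀ p ∈ rest, p.1 = i → p.2 ≠ ([] : List String) :=
      fun p hp => hi p (List.mem_cons_of_mem _ hp)
    have htmem : ∀ x ∈ tIdx v mx rest, j < x := by
      intro x hx
      simp only [tIdx, List.mem_map, List.mem_filter] at hx
      obtain ⟨q, ⟨hq, _⟩, rfl⟩ := hx
      exact hgt q hq
    have hemem : ∀ x ∈ eIdx rest, j < x := by
      intro x hx
      simp only [eIdx, List.mem_map, List.mem_filter] at hx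
      obtain ⟨q, ⟨hq, _⟩, rfl⟩ := hx
      exact hgt q hq
    by_cases hij : i = j
    · have hs : s ≠ [] := hi (j, s) (by simp) hij.symm
      rw [show csInnerA src i mx ((j, s) :: rest) = csInnerA src i mx rest from by
        simp [csInnerA, hij]]
      rw [ih hpw' hi']
      have he : eIdx ((j, s) :: rest) = eIdx rest := by simp [eIdx, hs]
      rw [he]
      by_cases hpt : s.getLast? = some v ∧ (s.length : Int) < mx
      · have ht : tIdx v mx ((j, s) :: rest) = j :: tIdx v mx rest := by
          simp [tIdx, hs, hpt.1, hpt.2]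
        rw [ht]
        have hji : ¬(j ≠ i) := fun h => h hij.symm
        rw [show csSelB i (j :: tIdx v mx rest) = (tIdx v mx rest).head? from by
          simp [csSelB, hji]]
        rw [csSelB_all_ne (fun x hx => by have := htmem x hx; omega)]
      · have ht : tIdx v mx ((j, s) :: rest) = tIdx v mx rest := by
          have h' : ¬(s ≠ [] ∧ s.getLast? = some v ∧ (s.length : Int) < mx) :=
            fun h => hpt ⟨h.2.1, h.2.2⟩
          simp [tIdx, h']
        rw [ht]
    · by_cases hs : s = []
      · subst hs
        have he : eIdx ((j, ([] : List String)) :: rest) = j :: eIdx rest := by simp [eIdx]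
        have ht : tIdx v mx ((j, ([] : List String)) :: rest) = tIdx v mx rest := by simp [tIdx]
        by_cases hmx : (0 : Int) < mx
        · rw [show csInnerA src i mx ((j, []) :: rest) = some j from by
            simp [csInnerA, hij, hmx]]
          rw [he, ht, if_pos hmx]
          cases hsel : csSelB i (tIdx v mx rest) with
          | none => simp [cmb]
          | some t =>
            have hjt : j < t := htmem t (csSelB_mem hsel)
            simp [cmb, min_eq_left (le_of_lt hjt)]
        · rw [show csInnerA src i mx ((j, []) :: rest) = csInnerA src i mx rest from by
            simp [csInnerA, hij, hmx]]
          rw [ih hpw' hi', if_neg hmx, if_neg hmx, ht]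
      · obtain ⟨k, hk⟩ : ∃ k, s.getLast? = some k := by
          cases hgl : s.getLast? with
          | none => exact absurd (List.getLast?_eq_none_iff.mp hgl) hs
          | some k => exact ⟨k, rfl⟩
        have hpgs : PySem.List.pyGet? s (-1) = some k := by
          rw [PySem.List.pyGet?_neg_one, hk]
        have he : eIdx ((j, s) :: rest) = eIdx rest := by simp [eIdx, hs]
        by_cases hc : k = v ∧ (s.length : Int) < mx
        · have ht : tIdx v mx ((j, s) :: rest) = j :: tIdx v mx rest := by
            simp [tIdx, hs, hc.1 ▸ hk, hc.2]
          rw [show csInnerA src i mx ((j, s) :: rest) = some j from by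
            simp [csInnerA, hij, hsrc, hpgs, hc.1, hc.2]]
          rw [he, ht]
          rw [show csSelB i (j :: tIdx v mx rest) = some j from by
            simp [csSelB, Ne.symm hij]]
          by_cases hmx : (0 : Int) < mx
          · rw [if_pos hmx]
            cases hhd : (eIdx rest).head? with
            | none => simp [cmb]
            | some e =>
              have hje : j < e := hemem e (by cases hE : eIdx rest <;> simp_all)
              simp [cmb, min_eq_right (le_of_lt hje)]
          · rw [if_neg hmx]; simp [cmb]
        · have hcond : ¬((s = [] ∨ PySem.List.pyGet? src (-1) = PySem.List.pyGet? s (-1)) ∧ (s.length : Int) < mx) := by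
            rw [hsrc, hpgs]
            rintro ⟨h1 | h2, hlen⟩
            · exact hs h1
            · exact hc ⟨(Option.some.inj h2).symm, hlen⟩
          rw [show csInnerA src i mx ((j, s) :: rest) = csInnerA src i mx rest from by
            simp only [csInnerA, if_neg hij, if_neg hcond]]
          have ht : tIdx v mx ((j, s) :: rest) = tIdx v mx rest := by
            have h' : ¬(s ≠ [] ∧ s.getLast? = some v ∧ (s.length : Int) < mx) := by
              rintro ⟨_, hgv, hlen⟩
              rw [hk] at hgv
              exact hc ⟨Option.some.inj hgv, hlen⟩
            simp [tIdx, h']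
          rw [he, ht, ih hpw' hi']

lemma outer_eq (sl : List (List String)) (mx : Int) (d : PySem.Dict String (List Int)) (fe : Option Int)
    (hinner : ∀ i s, (i, s) ∈ PySem.List.enumerate sl 0 → s ≠ [] →
      csInnerA s i mx (PySem.List.enumerate sl 0)
        = cmb fe (csSelB i (match PySem.List.pyGet? s (-1) with | some key => d.getD key [] | none => []))) :
    ∀ qs : List (Int × List String), (∀ p ∈ qs, p ∈ PySem.List.enumerate sl 0) →
      csOuterA sl mx qs = csPass2B d fe qs := by
  intro qs
  induction qs with
  | nil => intro _; simp [csOuterA, csPass2B]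
  | cons p rest ih =>
    obtain ⟨i, s⟩ := p
    intro hq
    have hq' : ∀ p ∈ rest, p ∈ PySem.List.enumerate sl 0 :=
      fun p hp => hq p (List.mem_cons_of_mem _ hp)
    by_cases hs : s = []
    · subst hs
      simp only [csOuterA, csPass2B, if_true]
      exact ih hq'
    · have hin := hinner i s (hq (i, s) (by simp)) hs
      simp only [csOuterA, csPass2B, if_neg hs]
      rw [hin]
      cases fe with
      | none =>
        cases hsel : csSelB i (match PySem.List.pyGet? s (-1) with | some key => d.getD key [] | none => []) with
        | none => simp [cmb, ih hq']
        | some t => simp [cmb]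
      | some e =>
        cases hsel : csSelB i (match PySem.List.pyGet? s (-1) with | some key => d.getD key [] | none => []) with
        | none => simp [cmb]
        | some t => simp [cmb]

-- ===== VERDICT (by name: the statement is the Claim_ definition above) =====
theorem check_solvability_spec : Claim_equal_check_solvability := by
  intro sl mx _
  unfold Spec_check_solvability check_solvability check_solvability_alt
  obtain ⟨h1, h2⟩ := csIndexB_spec mx (PySem.List.enumerate sl 0) [] PySem.Dict.empty
  show csOuterA sl mx (PySem.List.enumerate sl 0)
      = csPass2B (csIndexB mx (PySem.List.enumerate sl 0) ([], PySem.Dict.empty)).2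
          (if (csIndexB mx (PySem.List.enumerate sl 0) ([], PySem.Dict.empty)).1 ≠ [] ∧ 0 < mx
           then (csIndexB mx (PySem.List.enumerate sl 0) ([], PySem.Dict.empty)).1.head? else none)
          (PySem.List.enumerate sl 0)
  have hemp : (csIndexB mx (PySem.List.enumerate sl 0) ([], PySem.Dict.empty)).1
      = eIdx (PySem.List.enumerate sl 0) := by simpa using h1
  have hd : ∀ v, (csIndexB mx (PySem.List.enumerate sl 0) ([], PySem.Dict.empty)).2.getD v []
      = tIdx v mx (PySem.List.enumerate sl 0) := by
    intro v; rw [h2 v]; simp [PySem.Dict.getD_empty]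
  have hfe : (if (csIndexB mx (PySem.List.enumerate sl 0) ([], PySem.Dict.empty)).1 ≠ [] ∧ 0 < mx
       then (csIndexB mx (PySem.List.enumerate sl 0) ([], PySem.Dict.empty)).1.head? else none)
      = (if 0 < mx then (eIdx (PySem.List.enumerate sl 0)).head? else none) := by
    rw [hemp]
    by_cases h0 : (0 : Int) < mx
    · by_cases hE : eIdx (PySem.List.enumerate sl 0) = []
      · simp [hE, h0]
      · simp [hE, h0]
    · simp [h0]
  rw [hfe]
  apply outer_eq sl mx _ _ _ (PySem.List.enumerate sl 0) (fun p hp => hp)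
  intro i s hmem hs
  obtain ⟨k, hk⟩ : ∃ k, s.getLast? = some k := by
    cases hgl : s.getLast? with
    | none => exact absurd (List.getLast?_eq_none_iff.mp hgl) hs
    | some k => exact ⟨k, rfl⟩
  have hpgs : PySem.List.pyGet? s (-1) = some k := by
    rw [PySem.List.pyGet?_neg_one, hk]
  rw [show (match PySem.List.pyGet? s (-1) with
      | some key => (csIndexB mx (PySem.List.enumerate sl 0) ([], PySem.Dict.empty)).2.getD key []
      | none => ([] : List Int)) = (csIndexB mx (PySem.List.enumerate sl 0) ([], PySem.Dict.empty)).2.getD k [] from by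
    rw [hpgs]]
  rw [hd k]
  apply inner_eq s i mx k hk (PySem.List.enumerate sl 0) (PySem.List.pairwise_lt_enumerate sl 0)
  intro p hp hpi
  rw [PySem.List.mem_enumerate_iff] at hp hmem
  obtain ⟨a, ha, rfl⟩ := hp
  obtain ⟨b, hb, hmeq⟩ := hmem
  have hib : i = (b : Int) := by simpa using congrArg Prod.fst hmeq
  have hsb : s = sl[b] := by simpa using congrArg Prod.snd hmeq
  have hab : a = b := by
    have : ((a : Int)) = (b : Int) := by simpa [hib] using hpi
    exact_mod_cast this
  subst hab
  simpa [← hsb] using hs
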